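-- pv_equiv track=rewrite | github.com/smqadri/CISC610 | Assignment-6 - String Algorithms/CISC610-SMQ-Assignment6-StringAlgorithms-Submission.py | getLongestString
-- ===== SOURCE A (Python) =====
-- def getLongestString(list_of_strings):          # This function returns the longest string from the list of strings
--     max_len = -1
--     res = list()                    # The list of strings is initialized
--     for ele in list_of_strings:     # The list of strings is iterated
--         if len(ele[0]) > max_len:       # If the length of the substring is greater than the max length, then the substring is returned
--             max_len = len(ele[0])               # The max length is set to the length of the substring
--             res = list()                        # The list of strings is initialized
--             res.append(ele[1])                  # The substring is appended to the list of strings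
--         elif len(ele[0]) == max_len:    # Else If the length of the substring is equal to the max length, then the substring is appended to the list of strings
--             res.append(ele[1])              # The substring is appended to the list of strings
--     return res                      # The list of strings is returned
-- ===== SOURCE B (Python) =====
-- def getLongestString(list_of_strings):
--     # Two-pass: compute the maximum first-element length, then filter.
--     best = max((len(ele[0]) for ele in list_of_strings), default=-1)
--     return [ele[1] for ele in list_of_strings if len(ele[0]) == best]
-- ===== Notes on version B (the rewrite author's own statement) =====
-- stated objective: idiomatic
-- what changed: Replaces A's fused scan with reset-on-new-max state by a two-pass compute-max-then-filter comprehension.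
import Mathlib
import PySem

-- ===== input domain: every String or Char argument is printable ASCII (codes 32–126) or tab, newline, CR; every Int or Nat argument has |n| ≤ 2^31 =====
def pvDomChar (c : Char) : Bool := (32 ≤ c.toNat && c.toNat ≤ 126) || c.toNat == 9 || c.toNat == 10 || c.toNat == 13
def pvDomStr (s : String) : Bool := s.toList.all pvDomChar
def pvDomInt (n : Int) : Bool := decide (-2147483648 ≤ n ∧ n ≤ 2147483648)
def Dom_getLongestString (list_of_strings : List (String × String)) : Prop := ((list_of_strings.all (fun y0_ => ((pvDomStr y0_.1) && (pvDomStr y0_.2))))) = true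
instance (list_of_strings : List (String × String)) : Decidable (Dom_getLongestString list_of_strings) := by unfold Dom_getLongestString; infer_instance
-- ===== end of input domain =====

-- B replaces A's fused scan (with reset-on-new-max state) by an idiomatic two-pass max-then-filter.

-- ===== PORT A =====
-- Port of A: single fold carrying (max_len, res), resetting res on a new maximum.
def getLongestString (list_of_strings : List (String × String)) : List String :=
  (list_of_strings.foldl
    (fun (st : Int × List String) ele =>
      if PySem.Str.len ele.1 > st.1 then (PySem.Str.len ele.1, [ele.2])
      else if PySem.Str.len ele.1 = st.1 then (st.1, st.2 ++ [ele.2])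
      else st)
    (-1, [])).2

-- ===== PORT B =====
-- Port of B: compute the max length in one pass, then filter-and-project.
def getLongestString_alt (list_of_strings : List (String × String)) : List String :=
  let best : Int := list_of_strings.foldl (fun m ele => max m (PySem.Str.len ele.1)) (-1)
  (list_of_strings.filter (fun ele => PySem.Str.len ele.1 == best)).map Prod.snd

-- ===== PRECONDITION & SPEC =====
def Spec_getLongestString (list_of_strings : List (String × String)) (out : List String) : Prop := out = getLongestString_alt list_of_strings
instance (list_of_strings : List (String × String)) (out : List String) : Decidable (Spec_getLongestString list_of_strings out) := by unfold Spec_getLongestString; infer_instance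

-- ===== CLAIM (what is proved, stated in full; the proofs are below) =====
def Claim_equal_getLongestString : Prop := ∀ (list_of_strings : List (String × String)), Dom_getLongestString list_of_strings → Spec_getLongestString list_of_strings (getLongestString list_of_strings)

-- ===== LEMMAS AND PROOFS =====
def pvMaxLen (l : List (String × String)) (m : Int) : Int :=
  l.foldl (fun m ele => max m (PySem.Str.len ele.1)) m

lemma pvMaxLen_nil (m : Int) : pvMaxLen [] m = m := rfl

lemma pvMaxLen_cons (e : String × String) (l : List (String × String)) (m : Int) :
    pvMaxLen (e :: l) m = pvMaxLen l (max m (PySem.Str.len e.1)) := rfl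

lemma le_pvMaxLen (l : List (String × String)) (m : Int) : m ≤ pvMaxLen l m := by
  induction l generalizing m with
  | nil => simp [pvMaxLen_nil]
  | cons e l ih =>
    rw [pvMaxLen_cons]
    exact le_trans (le_max_left _ _) (ih (max m (PySem.Str.len e.1)))

-- A's loop from any state (m, res) equals: keep res iff no element beats m, then append the filtered tails.
lemma pvLoop_eq (l : List (String × String)) :
    ∀ (m : Int) (res : List String),
    (l.foldl
      (fun (st : Int × List String) ele =>
        if PySem.Str.len ele.1 > st.1 then (PySem.Str.len ele.1, [ele.2])
        else if PySem.Str.len ele.1 = st.1 then (st.1, st.2 ++ [ele.2])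
        else st)
      (m, res)).2
    = (if pvMaxLen l m = m then res else [])
      ++ (l.filter (fun ele => PySem.Str.len ele.1 == pvMaxLen l m)).map Prod.snd := by
  induction l with
  | nil => intro m res; simp [pvMaxLen_nil]
  | cons e l ih =>
    intro m res
    rw [pvMaxLen_cons, List.foldl_cons, List.filter_cons]
    by_cases h1 : PySem.Str.len e.1 > m
    · have hmax : max m (PySem.Str.len e.1) = PySem.Str.len e.1 := by omega
      rw [if_pos h1, hmax, ih]
      have hMge : PySem.Str.len e.1 ≤ pvMaxLen l (PySem.Str.len e.1) := le_pvMaxLen l _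
      rw [if_neg (by omega : ¬ pvMaxLen l (PySem.Str.len e.1) = m)]
      by_cases h2 : pvMaxLen l (PySem.Str.len e.1) = PySem.Str.len e.1
      · rw [if_pos h2, if_pos (beq_iff_eq.mpr h2.symm)]
        rw [List.map_cons, List.nil_append, List.cons_append, List.nil_append]
      · rw [if_neg h2, if_neg (by rw [beq_iff_eq]; omega)]
    · have hmax : max m (PySem.Str.len e.1) = m := by omega
      rw [if_neg h1, hmax]
      have hMge : m ≤ pvMaxLen l m := le_pvMaxLen l m
      by_cases h2 : PySem.Str.len e.1 = m
      · rw [if_pos h2, ih]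
        by_cases h3 : pvMaxLen l m = m
        · have hb : (PySem.Str.len e.1 == pvMaxLen l m) = true := by rw [beq_iff_eq]; omega
          rw [if_pos h3, if_pos hb]
          simp [h3]
        · have hb : ¬ ((PySem.Str.len e.1 == pvMaxLen l m) = true) := by rw [beq_iff_eq]; omega
          rw [if_neg hb]
          simp [h3]
      · have hb : ¬ ((PySem.Str.len e.1 == pvMaxLen l m) = true) := by rw [beq_iff_eq]; omega
        rw [if_neg h2, ih, if_neg hb]

-- ===== VERDICT =====
theorem getLongestString_spec : Claim_equal_getLongestString := by
  intro l _
  show getLongestString l = getLongestString_alt l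
  unfold getLongestString getLongestString_alt
  rw [pvLoop_eq l (-1) []]
  by_cases h : pvMaxLen l (-1) = -1 <;> simp [pvMaxLen]
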